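-- pv_equiv track=rewrite | github.com/NateRiz/Flo | PictureImporter.py | _get_lines_far_apart
-- ===== SOURCE A (Python) =====
-- def _get_lines_far_apart(nums):
--     def helper(_nums):
--         start = 0
--         res = []
--         for i in range(1, len(_nums)):
--             if _nums[i] != _nums[i - 1] + 1:
--                 res.append((_nums[start] + _nums[i - 1]) // 2)
--                 start = i
--         res.append((_nums[start] + _nums[-1]) // 2)
--         return res
--
--     x = sorted(list(set([i[0] for i in nums])))
--     y = sorted(list(set([i[1] for i in nums])))
--
--     return helper(x), helper(y)
-- ===== SOURCE B (Python) =====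
-- def _get_lines_far_apart(nums):
--     def helper(vals):
--         starts = sorted(v for v in vals if v - 1 not in vals)
--         ends = sorted(v for v in vals if v + 1 not in vals)
--         return [(s + e) // 2 for s, e in zip(starts, ends)]
--
--     return helper({p[0] for p in nums}), helper({p[1] for p in nums})
-- ===== Notes on version B (the rewrite author's own statement) =====
-- stated objective: alternative
-- what changed: Replaces A's neighbor-scan over the sorted coordinate list by set-membership run detection: a value is a run start iff v-1 is not in the coordinate set and a run end iff v+1 is not, then the sorted starts and sorted ends are zipped into midpoints.
import Mathlib
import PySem

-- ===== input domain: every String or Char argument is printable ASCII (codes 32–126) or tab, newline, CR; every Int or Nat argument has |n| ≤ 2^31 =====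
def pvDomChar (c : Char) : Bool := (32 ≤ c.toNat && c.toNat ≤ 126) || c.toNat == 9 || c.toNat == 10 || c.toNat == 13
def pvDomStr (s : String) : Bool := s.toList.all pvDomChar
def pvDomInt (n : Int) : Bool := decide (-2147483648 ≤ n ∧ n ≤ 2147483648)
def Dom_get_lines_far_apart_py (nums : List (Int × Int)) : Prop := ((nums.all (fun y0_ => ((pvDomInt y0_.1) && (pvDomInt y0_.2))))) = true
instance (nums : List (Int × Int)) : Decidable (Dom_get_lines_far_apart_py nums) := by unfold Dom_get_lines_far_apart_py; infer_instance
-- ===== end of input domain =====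

-- B replaces A's neighbor-scan over the sorted list by set-membership run detection
-- (v is a run start iff v-1 is not in the set, a run end iff v+1 is not); alternative algorithm, same cost.

-- ===== PORT A =====
-- A's inner helper: one pass over indices with a mutable run start and an accumulating result list.
def pvHelperA (ns : List Int) : Int × List Int :=
  (PySem.List.pyRange 1 (ns.length : Int) 1).foldl
    (fun (acc : Int × List Int) i =>
      if PySem.List.pyGetD ns i 0 ≠ PySem.List.pyGetD ns (i - 1) 0 + 1 then
        (i, acc.2 ++ [PySem.Int.floordiv (PySem.List.pyGetD ns acc.1 0 + PySem.List.pyGetD ns (i - 1) 0) 2])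
      else acc)
    (0, [])

def pvHelperA_out (ns : List Int) : List Int :=
  let st := pvHelperA ns
  st.2 ++ [PySem.Int.floordiv (PySem.List.pyGetD ns st.1 0 + PySem.List.pyGetD ns (-1) 0) 2]

def get_lines_far_apart_py (nums : List (Int × Int)) : List Int × List Int :=
  let x := PySem.List.sorted (PySem.Set.ofList (nums.map (fun i => i.1))) (fun v => v) false
  let y := PySem.List.sorted (PySem.Set.ofList (nums.map (fun i => i.2))) (fun v => v) false
  (pvHelperA_out x, pvHelperA_out y)

-- ===== PORT B =====
-- B's helper: run starts and run ends found by set membership, sorted and zipped into midpoints.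
def pvHelperB (vals : PySem.Set Int) : List Int :=
  let starts := PySem.List.sorted (vals.filter (fun v => !(PySem.Set.contains vals (v - 1)))) (fun v => v) false
  let ends := PySem.List.sorted (vals.filter (fun v => !(PySem.Set.contains vals (v + 1)))) (fun v => v) false
  (starts.zip ends).map (fun p => PySem.Int.floordiv (p.1 + p.2) 2)

def get_lines_far_apart_py_alt (nums : List (Int × Int)) : List Int × List Int :=
  (pvHelperB (PySem.Set.ofList (nums.map (fun p => p.1))),
   pvHelperB (PySem.Set.ofList (nums.map (fun p => p.2))))

-- ===== PRECONDITION & SPEC =====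
-- Pre_ excludes only the empty list, on which A raises IndexError (ns[-1] on an empty coordinate list).
def Pre_get_lines_far_apart_py (nums : List (Int × Int)) : Prop := nums ≠ []
instance (nums : List (Int × Int)) : Decidable (Pre_get_lines_far_apart_py nums) := by unfold Pre_get_lines_far_apart_py; infer_instance

def pvWitness_get_lines_far_apart_py : (List (Int × Int)) := [(1, 4), (2, 7), (5, 8)]

def Spec_get_lines_far_apart_py (nums : List (Int × Int)) (out : List Int × List Int) : Prop := out = get_lines_far_apart_py_alt nums
instance (nums : List (Int × Int)) (out : List Int × List Int) : Decidable (Spec_get_lines_far_apart_py nums out) := by unfold Spec_get_lines_far_apart_py; infer_instance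

-- ===== CLAIM (what is proved, stated in full; the proofs are below) =====
def Claim_equal_get_lines_far_apart_py : Prop := ∀ (nums : List (Int × Int)), Dom_get_lines_far_apart_py nums → Pre_get_lines_far_apart_py nums → Spec_get_lines_far_apart_py nums (get_lines_far_apart_py nums)

-- ===== LEMMAS AND PROOFS =====

-- value-level body of A's loop, acting on (current run-start VALUE, result) and the pair (prev, cur)
def pvBodyVal (acc : Int × List Int) (pc : Int × Int) : Int × List Int :=
  if pc.2 ≠ pc.1 + 1 then (pc.2, acc.2 ++ [PySem.Int.floordiv (acc.1 + pc.1) 2]) else acc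

-- A's index fold, projected through i ↦ ns[i], is the value fold over the pair list
theorem phi_fold (ns : List Int) :
    ∀ (L : List Int) (st : Int) (res : List Int),
      (fun p : Int × List Int => (PySem.List.pyGetD ns p.1 0, p.2))
        (L.foldl (fun (acc : Int × List Int) i =>
          if PySem.List.pyGetD ns i 0 ≠ PySem.List.pyGetD ns (i - 1) 0 + 1 then
            (i, acc.2 ++ [PySem.Int.floordiv (PySem.List.pyGetD ns acc.1 0 + PySem.List.pyGetD ns (i - 1) 0) 2])
          else acc) (st, res))
      = (L.map (fun i => (PySem.List.pyGetD ns (i - 1) 0, PySem.List.pyGetD ns i 0))).foldl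
          pvBodyVal (PySem.List.pyGetD ns st 0, res) := by
  intro L
  induction L with
  | nil => intro st res; rfl
  | cons i L ih =>
    intro st res
    by_cases h : PySem.List.pyGetD ns i 0 ≠ PySem.List.pyGetD ns (i - 1) 0 + 1
    · simp only [List.foldl_cons, List.map_cons, if_pos h, pvBodyVal, ih]
    · simp only [List.foldl_cons, List.map_cons, pvBodyVal, if_neg h, ih]

-- the pair list A's loop reads is exactly zip ns (tail ns)
theorem pairs_eq (ns : List Int) :
    (PySem.List.pyRange 1 (ns.length : Int) 1).map
      (fun i => (PySem.List.pyGetD ns (i - 1) 0, PySem.List.pyGetD ns i 0))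
    = ns.zip ns.tail := by
  rw [PySem.List.pyRange_one, List.map_map]
  apply List.ext_getElem
  · simp [List.length_zip]
  · intro k hk1 hk2
    simp only [List.getElem_map, List.getElem_range, Function.comp_apply]
    rw [List.getElem_zip]
    simp only [List.length_map, List.length_range] at hk1
    have hk : k < ns.length - 1 := by omega
    have e1 : (1 : Int) + (k : Int) - 1 = ((k : Nat) : Int) := by ring
    have e2 : (1 : Int) + (k : Int) = (((k + 1 : Nat)) : Int) := by push_cast; ring
    rw [e1, e2, PySem.List.pyGetD_natCast, PySem.List.pyGetD_natCast]
    rw [List.getD_eq_getElem ns 0 (by omega), List.getD_eq_getElem ns 0 (by omega)]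
    rw [List.getElem_tail]

-- core invariant: the value fold over a strictly increasing list produces the start/end midpoints
theorem fold_runs_val :
    ∀ (t : List Int) (b st : Int) (res : List Int), (b :: t).Pairwise (· < ·) →
      (let r := ((b :: t).zip t).foldl pvBodyVal (st, res)
       r.2 ++ [PySem.Int.floordiv (r.1 + (b :: t).getLast (by simp)) 2])
      = res ++ ((st :: t.filter (fun v => !(decide ((v - 1) ∈ b :: t)))).zip
                 ((b :: t).filter (fun v => !(decide ((v + 1) ∈ b :: t))))).map
            (fun p => PySem.Int.floordiv (p.1 + p.2) 2) := by
  intro t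
  induction t with
  | nil =>
    intro b st res _
    simp [List.filter]
  | cons c t' ih =>
    intro b st res h
    rw [List.pairwise_cons] at h
    obtain ⟨hball, h'⟩ := h
    have hbc : b < c := hball c (by simp)
    have hcall : ∀ v ∈ t', c < v := by
      rw [List.pairwise_cons] at h'; exact h'.1
    -- shared filter congruences
    have econg1 : ∀ v ∈ t',
        (!(decide ((v - 1) ∈ b :: c :: t'))) = (!(decide ((v - 1) ∈ c :: t'))) := by
      intro v hv
      have hcv := hcall v hv
      have hne : v - 1 ≠ b := by omega
      simp [List.mem_cons, hne]
    have econg2 : ∀ v ∈ c :: t',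
        (!(decide ((v + 1) ∈ b :: c :: t'))) = (!(decide ((v + 1) ∈ c :: t'))) := by
      intro v hv
      have hbv : b < v := hball v hv
      have hne : v + 1 ≠ b := by omega
      simp [List.mem_cons, hne]
    have hlast : (b :: c :: t').getLast (by simp) = (c :: t').getLast (by simp) :=
      List.getLast_cons (by simp)
    by_cases hc : c = b + 1
    · -- run continues
      have step : pvBodyVal (st, res) (b, c) = (st, res) := by
        simp [pvBodyVal, hc]
      have e1 : (c :: t').filter (fun v => !(decide ((v - 1) ∈ b :: c :: t')))
          = t'.filter (fun v => !(decide ((v - 1) ∈ c :: t'))) := by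
        rw [List.filter_cons]
        have : (!(decide ((c - 1) ∈ b :: c :: t'))) = false := by
          have hcb : c - 1 = b := by omega
          simp [List.mem_cons, hcb]
        rw [this, if_neg (by simp)]
        exact List.filter_congr econg1
      have e2 : (b :: c :: t').filter (fun v => !(decide ((v + 1) ∈ b :: c :: t')))
          = (c :: t').filter (fun v => !(decide ((v + 1) ∈ c :: t'))) := by
        rw [List.filter_cons]
        have : (!(decide ((b + 1) ∈ b :: c :: t'))) = false := by
          have hbcx : b + 1 = c := hc.symm
          simp [List.mem_cons, hbcx]
        rw [this, if_neg (by simp)]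
        exact List.filter_congr econg2
      simp only [List.zip_cons_cons, List.foldl_cons, step, hlast, e1, e2]
      exact ih c st res h'
    · -- run breaks at c
      have step : pvBodyVal (st, res) (b, c)
          = (c, res ++ [PySem.Int.floordiv (st + b) 2]) := by
        simp [pvBodyVal, hc]
      have e3 : (c :: t').filter (fun v => !(decide ((v - 1) ∈ b :: c :: t')))
          = c :: t'.filter (fun v => !(decide ((v - 1) ∈ c :: t'))) := by
        rw [List.filter_cons]
        have hcm : (!(decide ((c - 1) ∈ b :: c :: t'))) = true := by
          simp only [List.mem_cons, Bool.not_eq_true', decide_eq_false_iff_not]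
          push Not
          refine ⟨by omega, by omega, fun hmem => ?_⟩
          have := hcall _ hmem; omega
        rw [hcm, if_pos rfl, List.filter_congr econg1]
      have e4 : (b :: c :: t').filter (fun v => !(decide ((v + 1) ∈ b :: c :: t')))
          = b :: (c :: t').filter (fun v => !(decide ((v + 1) ∈ c :: t'))) := by
        rw [List.filter_cons]
        have hbm : (!(decide ((b + 1) ∈ b :: c :: t'))) = true := by
          simp only [List.mem_cons, Bool.not_eq_true', decide_eq_false_iff_not]
          push Not
          refine ⟨by omega, by omega, fun hmem => ?_⟩
          have := hcall _ hmem; omega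
        rw [hbm, if_pos rfl, List.filter_congr econg2]
      simp only [List.zip_cons_cons, List.foldl_cons, step, hlast, e3, e4]
      rw [ih c c (res ++ [PySem.Int.floordiv (st + b) 2]) h']
      simp [List.append_assoc]

-- head of a strictly increasing list always passes the start filter
theorem start_filter_head (b : Int) (t : List Int) (h : (b :: t).Pairwise (· < ·)) :
    (b :: t).filter (fun v => !(decide ((v - 1) ∈ b :: t)))
    = b :: t.filter (fun v => !(decide ((v - 1) ∈ b :: t))) := by
  rw [List.pairwise_cons] at h
  rw [List.filter_cons]
  have hb : (!(decide ((b - 1) ∈ b :: t))) = true := by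
    simp only [List.mem_cons, Bool.not_eq_true', decide_eq_false_iff_not]
    push Not
    refine ⟨by omega, fun hmem => ?_⟩
    have := h.1 _ hmem; omega
  rw [hb, if_pos rfl]

-- sorted(filter p (set xs)) = filter p (sorted (set xs))
theorem sorted_filter (xs : List Int) (p : Int → Bool) :
    PySem.List.sorted ((PySem.Set.ofList xs).filter p) (fun v => v) false
    = (PySem.List.sorted (PySem.Set.ofList xs) (fun v => v) false).filter p := by
  apply PySem.List.sorted_eq_of_perm_of_pairwise_lt
  · exact ((PySem.List.sorted_perm (PySem.Set.ofList xs) (fun v => v) false).filter p)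
  · exact (PySem.List.sorted_ofList_pairwise_lt xs).filter p

theorem sorted_ofList_ne_nil (xs : List Int) (h : xs ≠ []) :
    PySem.List.sorted (PySem.Set.ofList xs) (fun v => v) false ≠ [] := by
  intro hc
  rw [PySem.List.sorted_eq_nil_iff] at hc
  obtain ⟨a, as, rfl⟩ := List.exists_cons_of_ne_nil h
  have : a ∈ PySem.Set.ofList (a :: as) := by
    rw [PySem.Set.mem_ofList]; simp
  rw [hc] at this
  exact absurd this (List.not_mem_nil)

-- A's helper equals B's helper on the deduped coordinate set
theorem helper_eq (xs : List Int) (h : xs ≠ []) :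
    pvHelperA_out (PySem.List.sorted (PySem.Set.ofList xs) (fun v => v) false)
    = pvHelperB (PySem.Set.ofList xs) := by
  have hpw : (PySem.List.sorted (PySem.Set.ofList xs) (fun v => v) false).Pairwise (· < ·) :=
    PySem.List.sorted_ofList_pairwise_lt xs
  have hne := sorted_ofList_ne_nil xs h
  unfold pvHelperB
  have hc1 : (PySem.Set.ofList xs).filter (fun v => !(PySem.Set.contains (PySem.Set.ofList xs) (v - 1)))
      = (PySem.Set.ofList xs).filter (fun v => !(decide ((v - 1) ∈ PySem.List.sorted (PySem.Set.ofList xs) (fun v => v) false))) := by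
    apply List.filter_congr; intro v _
    rw [PySem.Set.contains_eq_decide]
    congr 1
    exact decide_eq_decide.mpr (PySem.List.mem_sorted _ _ _ _).symm
  have hc2 : (PySem.Set.ofList xs).filter (fun v => !(PySem.Set.contains (PySem.Set.ofList xs) (v + 1)))
      = (PySem.Set.ofList xs).filter (fun v => !(decide ((v + 1) ∈ PySem.List.sorted (PySem.Set.ofList xs) (fun v => v) false))) := by
    apply List.filter_congr; intro v _
    rw [PySem.Set.contains_eq_decide]
    congr 1
    exact decide_eq_decide.mpr (PySem.List.mem_sorted _ _ _ _).symm
  rw [hc1, hc2, sorted_filter, sorted_filter]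
  -- name the sorted list and destructure it
  generalize hgen : PySem.List.sorted (PySem.Set.ofList xs) (fun v => v) false = ns at *
  obtain ⟨b, t, rfl⟩ := List.exists_cons_of_ne_nil hne
  -- A side: project the index fold through i ↦ ns[i]
  unfold pvHelperA_out pvHelperA
  have hphi := phi_fold (b :: t) (PySem.List.pyRange 1 ((b :: t).length : Int) 1) 0 []
  rw [pairs_eq (b :: t)] at hphi
  simp only at hphi
  have h1 := congrArg Prod.fst hphi
  have h2 := congrArg Prod.snd hphi
  simp only at h1 h2
  simp only [h1, h2, PySem.List.pyGetD_neg_one (b :: t) 0 hne, PySem.List.pyGetD_zero_cons]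
  have hmain := fold_runs_val t b b [] hpw
  simp only [List.tail_cons]
  rw [hmain, List.nil_append, ← start_filter_head b t hpw]

-- ===== VERDICT (by name: the statement is the Claim_ definition above) =====
theorem get_lines_far_apart_py_spec : Claim_equal_get_lines_far_apart_py := by
  intro nums _ hpre
  unfold Spec_get_lines_far_apart_py get_lines_far_apart_py get_lines_far_apart_py_alt
  have h1 : nums.map (fun p => p.1) ≠ [] := by simpa using hpre
  have h2 : nums.map (fun p => p.2) ≠ [] := by simpa using hpre
  simp only
  rw [helper_eq _ h1, helper_eq _ h2]
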